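-- pv_equiv track=rewrite | github.com/NunoMoura/codewiki | scripts/rebuild_docs_meta.py | assign_agent_names
-- ===== SOURCE A (Python) =====
-- AGENT_NAME_POOL = [
--     "Otter", "Kestrel", "Marten", "Heron", "Fox", "Raven", "Panda", "Lynx",
--     "Badger", "Cormorant", "Falcon", "Tern", "Wren", "Puma", "Seal", "Yak",
--     "Ibis", "Manta", "Orca", "Puffin", "Sable", "Swift", "Wolf", "Quail",
--     "Mole", "Bison", "Gecko", "Jaguar", "Koala", "Narwhal", "Robin", "Stoat",
-- ]
--
-- def stable_agent_name(session_id: str) -> str: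
--     value = 0
--     for ch in session_id:
--         value = ((value * 33) + ord(ch)) & 0xFFFFFFFF
--     return AGENT_NAME_POOL[value % len(AGENT_NAME_POOL)]
--
-- def assign_agent_names(session_ids: list[str]) -> dict[str, str]:
--     used: dict[str, int] = {}
--     assigned: dict[str, str] = {}
--     for session_id in sorted(session_ids):
--         base = stable_agent_name(session_id)
--         count = used.get(base, 0) + 1
--         used[base] = count
--         assigned[session_id] = base if count == 1 else f"{base} {count}"
--     return assigned
-- ===== SOURCE B (Python) =====
-- AGENT_NAME_POOL = [
--     "Otter", "Kestrel", "Marten", "Heron", "Fox", "Raven", "Panda", "Lynx",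
--     "Badger", "Cormorant", "Falcon", "Tern", "Wren", "Puma", "Seal", "Yak",
--     "Ibis", "Manta", "Orca", "Puffin", "Sable", "Swift", "Wolf", "Quail",
--     "Mole", "Bison", "Gecko", "Jaguar", "Koala", "Narwhal", "Robin", "Stoat",
-- ]
--
-- def stable_agent_name(session_id: str) -> str:
--     value = 0
--     for ch in session_id:
--         value = ((value * 33) + ord(ch)) & 0xFFFFFFFF
--     return AGENT_NAME_POOL[value % len(AGENT_NAME_POOL)]
--
-- def assign_agent_names(session_ids: list[str]) -> dict[str, str]:
--     # Grouped numbering instead of A's running counter: build a groups index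
--     # base -> its occurrences (in sorted order), number each group by
--     # enumeration (later duplicates overwrite earlier ones), then assemble
--     # the result over the distinct ids in sorted order.
--     ordered = sorted(session_ids)
--     groups: dict[str, list[str]] = {}
--     for t in ordered:
--         groups.setdefault(stable_agent_name(t), []).append(t)
--     name: dict[str, str] = {}
--     for base, g in groups.items():
--         for i, t in enumerate(g):
--             c = i + 1
--             name[t] = base if c == 1 else f"{base} {c}"
--     return {sid: name[sid] for sid in dict.fromkeys(ordered)}
-- ===== Notes on version B (the rewrite author's own statement) =====
-- stated objective: alternative
-- what changed: Replaces A's single pass with a running per-base counter dict by a staged grouped-numbering scheme: build a groups index (base name -> its occurrences in sorted order), number each group by enumeration, then assemble the result over the distinct ids in sorted order.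
import Mathlib
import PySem

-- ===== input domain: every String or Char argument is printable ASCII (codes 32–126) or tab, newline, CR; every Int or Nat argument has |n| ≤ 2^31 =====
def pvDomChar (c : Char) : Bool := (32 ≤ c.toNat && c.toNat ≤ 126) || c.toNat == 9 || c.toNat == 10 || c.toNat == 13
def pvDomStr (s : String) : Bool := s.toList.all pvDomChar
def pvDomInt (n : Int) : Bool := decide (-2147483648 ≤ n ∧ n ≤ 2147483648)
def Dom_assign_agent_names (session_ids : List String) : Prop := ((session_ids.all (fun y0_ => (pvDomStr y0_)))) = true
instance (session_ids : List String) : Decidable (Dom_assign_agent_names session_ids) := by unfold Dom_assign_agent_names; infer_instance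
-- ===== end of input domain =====

-- B replaces A's running counter state by grouped numbering: a groups index (base -> occurrences in sorted order), per-group enumeration, and a final assembly pass over the distinct ids (alternative decomposition, same results).


-- ===== PORT A =====
def AGENT_NAME_POOL : List String :=
  ["Otter", "Kestrel", "Marten", "Heron", "Fox", "Raven", "Panda", "Lynx",
   "Badger", "Cormorant", "Falcon", "Tern", "Wren", "Puma", "Seal", "Yak",
   "Ibis", "Manta", "Orca", "Puffin", "Sable", "Swift", "Wolf", "Quail",
   "Mole", "Bison", "Gecko", "Jaguar", "Koala", "Narwhal", "Robin", "Stoat"]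

def stable_agent_name (session_id : String) : String :=
  let value : Int :=
    session_id.toList.foldl (fun value ch => PySem.Int.band (value * 33 + (ch.toNat : Int)) 0xFFFFFFFF) 0
  -- AGENT_NAME_POOL[value % 32]: 0 ≤ value % 32 < 32, always in range, so pyGetD is exact here
  PySem.List.pyGetD AGENT_NAME_POOL (PySem.Int.mod value (AGENT_NAME_POOL.length : Int)) ""

def assign_agent_names (session_ids : List String) : List (String × String) :=
  ((PySem.List.sorted session_ids (fun x => x) false).foldl
    (fun (st : PySem.Dict String Int × PySem.Dict String String) session_id =>
      let base := stable_agent_name session_id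
      let count := PySem.Dict.getD st.1 base 0 + 1
      (PySem.Dict.insert st.1 base count,
       PySem.Dict.insert st.2 session_id
         (if count == 1 then base else base ++ " " ++ PySem.Int.toStr count)))
    (PySem.Dict.empty, PySem.Dict.empty)).2.items

-- ===== PORT B =====
def assign_agent_names_alt (session_ids : List String) : List (String × String) :=
  let ordered := PySem.List.sorted session_ids (fun x => x) false
  let groups := ordered.foldl
    (fun (d : PySem.Dict String (List String)) t =>
      PySem.Dict.modify d (stable_agent_name t) [] (fun g => g ++ [t]))
    PySem.Dict.empty
  let name := groups.items.foldl
    (fun (n : PySem.Dict String String) bg =>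
      (PySem.List.enumerate bg.2).foldl
        (fun (n : PySem.Dict String String) it =>
          let c : Int := it.1 + 1
          PySem.Dict.insert n it.2 (if c == 1 then bg.1 else bg.1 ++ " " ++ PySem.Int.toStr c))
        n)
    PySem.Dict.empty
  ((PySem.List.dedup ordered).foldl
    (fun (assigned : PySem.Dict String String) sid =>
      -- name[sid]: every distinct id was written during the group pass, so the key is
      -- present and getD's "" default is never taken
      PySem.Dict.insert assigned sid (PySem.Dict.getD name sid ""))
    PySem.Dict.empty).items

-- ===== PRECONDITION & SPEC =====
def Spec_assign_agent_names (session_ids : List String) (out : List (String × String)) : Prop := out = assign_agent_names_alt session_ids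
instance (session_ids : List String) (out : List (String × String)) : Decidable (Spec_assign_agent_names session_ids out) := by unfold Spec_assign_agent_names; infer_instance

-- ===== CLAIM (what is proved, stated in full; the proofs are below) =====
def Claim_equal_assign_agent_names : Prop := ∀ (session_ids : List String), Dom_assign_agent_names session_ids → Spec_assign_agent_names session_ids (assign_agent_names session_ids)

-- ===== LEMMAS AND PROOFS =====

-- A's loop body, named for the proofs (definitionally the lambda in assign_agent_names).
def pvStepA (st : PySem.Dict String Int × PySem.Dict String String) (session_id : String) :
    PySem.Dict String Int × PySem.Dict String String :=
  let base := stable_agent_name session_id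
  let count := PySem.Dict.getD st.1 base 0 + 1
  (PySem.Dict.insert st.1 base count,
   PySem.Dict.insert st.2 session_id
     (if count == 1 then base else base ++ " " ++ PySem.Int.toStr count))

-- The name built from a base and a count.
def pvName (base : String) (c : Int) : String :=
  if c == 1 then base else base ++ " " ++ PySem.Int.toStr c

-- B's groups index, inner numbering step, and name dict, named for the proofs
-- (definitionally the corresponding pieces of assign_agent_names_alt).
def pvGroups (ordered : List String) : PySem.Dict String (List String) :=
  ordered.foldl
    (fun d t => PySem.Dict.modify d (stable_agent_name t) [] (fun g => g ++ [t]))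
    PySem.Dict.empty

def pvIns (b : String) (n : PySem.Dict String String) (it : Int × String) :
    PySem.Dict String String :=
  PySem.Dict.insert n it.2 (pvName b (it.1 + 1))

def pvOuter (n : PySem.Dict String String) (bg : String × List String) :
    PySem.Dict String String :=
  (PySem.List.enumerate bg.2).foldl (pvIns bg.1) n

def pvNameDict (ordered : List String) : PySem.Dict String String :=
  (pvGroups ordered).items.foldl pvOuter PySem.Dict.empty

theorem pvStepA_eq (u : PySem.Dict String Int) (a : PySem.Dict String String) (x : String) :
    pvStepA (u, a) x =
      (PySem.Dict.insert u (stable_agent_name x) (PySem.Dict.getD u (stable_agent_name x) 0 + 1),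
       PySem.Dict.insert a x
         (if (PySem.Dict.getD u (stable_agent_name x) 0 + 1) == 1 then stable_agent_name x
          else stable_agent_name x ++ " " ++ PySem.Int.toStr (PySem.Dict.getD u (stable_agent_name x) 0 + 1))) := rfl

-- Ids not in the remaining list keep their assigned value through A's loop.
theorem pv_get?_foldA_of_not_mem (r : List String) :
    ∀ (u : PySem.Dict String Int) (a : PySem.Dict String String) (sid : String), sid ∉ r →
    (r.foldl pvStepA (u, a)).2.get? sid = a.get? sid := by
  induction r with
  | nil => intro u a sid _; rfl
  | cons x rs ih =>
    intro u a sid h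
    have hx : sid ≠ x := fun he => h (he ▸ List.mem_cons_self)
    rw [List.foldl_cons, pvStepA_eq, ih _ _ sid (fun hm => h (List.mem_cons_of_mem _ hm))]
    exact PySem.Dict.get?_insert_of_ne _ _ hx

-- Value invariant for A: on a sorted tail r, the final assigned value of any sid ∈ r is the
-- name built from (counter of sid's base so far) + (count in r of same-base ids ≤ sid).
theorem pv_get?_foldA (r : List String) :
    ∀ (u : PySem.Dict String Int) (a : PySem.Dict String String),
    r.Pairwise (· ≤ ·) → ∀ sid ∈ r,
    (r.foldl pvStepA (u, a)).2.get? sid =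
      some (pvName (stable_agent_name sid)
        (PySem.Dict.getD u (stable_agent_name sid) 0 +
          (r.countP (fun t => stable_agent_name t == stable_agent_name sid && decide (t ≤ sid)) : Int))) := by
  induction r with
  | nil => intro u a _ sid h; exact absurd h List.not_mem_nil
  | cons x rs ih =>
    intro u a hp sid hmem
    have hle : ∀ t ∈ rs, x ≤ t := (List.pairwise_cons.mp hp).1
    have hps : rs.Pairwise (· ≤ ·) := (List.pairwise_cons.mp hp).2
    rw [List.foldl_cons, pvStepA_eq]
    by_cases hin : sid ∈ rs
    · rw [ih _ _ hps sid hin, List.countP_cons]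
      have hxs : x ≤ sid := hle sid hin
      rw [PySem.Dict.getD_insert]
      by_cases hb : stable_agent_name sid = stable_agent_name x
      · rw [if_pos hb, ← hb]
        have hpx : (if (stable_agent_name sid == stable_agent_name sid && decide (x ≤ sid)) = true
            then 1 else 0) = 1 := by simp [hxs]
        rw [hpx]
        congr 2
        push_cast
        ring
      · rw [if_neg hb]
        have hbx : (stable_agent_name x == stable_agent_name sid) = false :=
          beq_eq_false_iff_ne.mpr (fun h => hb h.symm)
        rw [hbx, Bool.false_and]
        simp
    · have hsx : sid = x := by
        rcases List.mem_cons.mp hmem with h | h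
        · exact h
        · exact absurd h hin
      subst hsx
      rw [pv_get?_foldA_of_not_mem rs _ _ sid hin, PySem.Dict.get?_insert_self]
      have hcnt : rs.countP (fun t => stable_agent_name t == stable_agent_name sid && decide (t ≤ sid)) = 0 := by
        rw [List.countP_eq_zero]
        intro t ht
        have h1 : sid ≤ t := hle t ht
        by_cases h2 : t ≤ sid
        · exact absurd (le_antisymm h2 h1) (fun he => hin (he ▸ ht))
        · simp [h2]
      rw [List.countP_cons, hcnt]
      simp [pvName]

-- Keys of A's assigned dict after the loop: the processed ids, first occurrences in order.
theorem pv_keys_foldA (r : List String) :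
    ∀ (u : PySem.Dict String Int) (a : PySem.Dict String String),
    (r.foldl pvStepA (u, a)).2.keys = PySem.Set.update a.keys r := by
  induction r with
  | nil => intro u a; simp [PySem.Set.update]
  | cons x rs ih =>
    intro u a
    rw [List.foldl_cons, pvStepA_eq, ih, PySem.Set.update_cons]
    congr 1
    by_cases hc : a.contains x
    · rw [PySem.Dict.keys_insert_of_contains _ _ hc,
        PySem.Set.add_of_mem ((PySem.Dict.contains_iff_mem_keys _ _).mp hc)]
    · have hc' : a.contains x = false := by simpa using hc
      rw [PySem.Dict.keys_insert_of_not_contains _ _ hc',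
        PySem.Set.add_of_not_mem (fun hm => (by simp [(PySem.Dict.contains_iff_mem_keys _ _).mpr hm] at hc'))]

-- B's group lists are the same-base occurrences of the sorted list, in order.
theorem pv_getD_groups (ordered : List String) (b : String) :
    PySem.Dict.getD (pvGroups ordered) b [] =
      ordered.filter (fun t => stable_agent_name t == b) := by
  unfold pvGroups
  have h : (ordered.map (fun t => (stable_agent_name t, t))).foldl
        (fun d (p : String × String) => PySem.Dict.modify d p.1 [] (fun g => g ++ [p.2]))
        PySem.Dict.empty
      = ordered.foldl
        (fun d t => PySem.Dict.modify d (stable_agent_name t) [] (fun g => g ++ [t]))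
        PySem.Dict.empty := by
    simp [List.foldl_map]
  rw [← h, PySem.Dict.getD_foldl_modify_append]
  simp [List.filter_map, Function.comp_def, List.map_map]

-- Ids outside a group keep their value through that group's numbering pass.
theorem pv_inner_not_mem (g : List String) :
    ∀ (k : Int) (n : PySem.Dict String String) (b : String) (sid : String), sid ∉ g →
    ((PySem.List.enumerate g k).foldl (pvIns b) n).get? sid = n.get? sid := by
  induction g with
  | nil => intro k n b sid _; rfl
  | cons x gs ih =>
    intro k n b sid h
    have hx : sid ≠ x := fun he => h (he ▸ List.mem_cons_self)
    rw [PySem.List.enumerate_cons, List.foldl_cons,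
      ih _ _ b sid (fun hm => h (List.mem_cons_of_mem _ hm))]
    exact PySem.Dict.get?_insert_of_ne _ _ hx

-- Value invariant for B's group pass: numbering a sorted group starting at index k leaves
-- sid ∈ g with the name built from k + (count of members ≤ sid).
theorem pv_inner_val (g : List String) :
    ∀ (k : Int) (n : PySem.Dict String String) (b : String),
    g.Pairwise (· ≤ ·) → ∀ sid ∈ g,
    ((PySem.List.enumerate g k).foldl (pvIns b) n).get? sid =
      some (pvName b (k + (g.countP (fun t => decide (t ≤ sid)) : Int))) := by
  induction g with
  | nil => intro k n b _ sid h; exact absurd h List.not_mem_nil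
  | cons x gs ih =>
    intro k n b hp sid hmem
    have hle : ∀ t ∈ gs, x ≤ t := (List.pairwise_cons.mp hp).1
    have hps : gs.Pairwise (· ≤ ·) := (List.pairwise_cons.mp hp).2
    rw [PySem.List.enumerate_cons, List.foldl_cons]
    by_cases hin : sid ∈ gs
    · rw [ih _ _ b hps sid hin, List.countP_cons]
      have hxs : (decide (x ≤ sid)) = true := by simp [hle sid hin]
      rw [hxs]
      congr 2
      simp
      omega
    · have hsx : sid = x := by
        rcases List.mem_cons.mp hmem with h | h
        · exact h
        · exact absurd h hin
      subst hsx
      rw [pv_inner_not_mem gs _ _ b sid hin]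
      show (PySem.Dict.insert n sid (pvName b (k + 1))).get? sid = _
      rw [PySem.Dict.get?_insert_self]
      have hcnt : gs.countP (fun t => decide (t ≤ sid)) = 0 := by
        rw [List.countP_eq_zero]
        intro t ht
        have h1 : sid ≤ t := hle t ht
        by_cases h2 : t ≤ sid
        · exact absurd (le_antisymm h2 h1) (fun he => hin (he ▸ ht))
        · simp [h2]
      rw [List.countP_cons, hcnt]
      simp

-- Ids contained in none of the remaining groups keep their value.
theorem pv_outer_not_mem (its : List (String × List String)) :
    ∀ (n : PySem.Dict String String) (sid : String), (∀ p ∈ its, sid ∉ p.2) →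
    (its.foldl pvOuter n).get? sid = n.get? sid := by
  induction its with
  | nil => intro n sid _; rfl
  | cons hd rest ih =>
    intro n sid h
    rw [List.foldl_cons, ih _ sid (fun p hp => h p (List.mem_cons_of_mem _ hp))]
    exact pv_inner_not_mem hd.2 0 n hd.1 sid (h hd List.mem_cons_self)

-- The name dict's value for sid comes from sid's own (unique) group.
theorem pv_outer_val (its : List (String × List String)) :
    ∀ (n : PySem.Dict String String) (sid b : String) (g : List String),
    (its.map Prod.fst).Nodup → (b, g) ∈ its → sid ∈ g → g.Pairwise (· ≤ ·) →
    (∀ p ∈ its, p.1 ≠ b → sid ∉ p.2) →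
    (its.foldl pvOuter n).get? sid =
      some (pvName b ((g.countP (fun t => decide (t ≤ sid)) : Int))) := by
  induction its with
  | nil => intro n sid b g _ hmem _ _ _; exact absurd hmem List.not_mem_nil
  | cons hd rest ih =>
    intro n sid b g hnd hmem hsg hsort hother
    have hnd' : (rest.map Prod.fst).Nodup := (List.nodup_cons.mp (by simpa using hnd)).2
    have hhd : hd.1 ∉ rest.map Prod.fst := (List.nodup_cons.mp (by simpa using hnd)).1
    rw [List.foldl_cons]
    rcases List.mem_cons.mp hmem with he | hrest
    · have hhd2 : hd = (b, g) := he.symm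
      subst hhd2
      have hnone : ∀ p ∈ rest, sid ∉ p.2 := by
        intro p hp
        refine hother p (List.mem_cons_of_mem _ hp) ?_
        intro hpb
        apply hhd
        have hmm : p.1 ∈ rest.map Prod.fst := List.mem_map_of_mem hp
        rwa [hpb] at hmm
      rw [pv_outer_not_mem rest _ sid hnone]
      have h := pv_inner_val g 0 n b hsort sid hsg
      simpa using h
    · exact ih (pvOuter n hd) sid b g hnd' hrest hsg hsort
        (fun p hp => hother p (List.mem_cons_of_mem _ hp))

-- The name dict assigns every id of the sorted list its grouped number.
theorem pv_nameDict_val (ordered : List String) (sid : String)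
    (hsorted : ordered.Pairwise (· ≤ ·)) (hmem : sid ∈ ordered) :
    (pvNameDict ordered).get? sid =
      some (pvName (stable_agent_name sid)
        ((ordered.countP (fun t => stable_agent_name t == stable_agent_name sid && decide (t ≤ sid)) : Int))) := by
  have hknd : (pvGroups ordered).keys.Nodup :=
    PySem.Dict.nodup_keys_foldl_modify_key ordered stable_agent_name []
      (fun _ t g => g ++ [t]) PySem.Dict.empty (by simp)
  have hkeys : (pvGroups ordered).keys = PySem.Set.ofList (ordered.map stable_agent_name) := by
    have h := PySem.Dict.keys_foldl_modify_key ordered stable_agent_name []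
      (fun _ t g => g ++ [t]) PySem.Dict.empty
    simpa [PySem.Set.update_nil_left] using h
  have hitems : (pvGroups ordered).items =
      (pvGroups ordered).keys.map (fun k => (k, ordered.filter (fun t => stable_agent_name t == k))) := by
    rw [PySem.Dict.items_eq_map_keys (pvGroups ordered) hknd []]
    exact List.map_congr_left (fun k _ => by rw [pv_getD_groups])
  have hfst : ((pvGroups ordered).items.map Prod.fst).Nodup := by
    rw [hitems, List.map_map]
    simpa [Function.comp_def] using hknd
  have hbmem : stable_agent_name sid ∈ (pvGroups ordered).keys := by
    rw [hkeys]
    exact (PySem.Set.mem_ofList _ _).mpr (List.mem_map_of_mem hmem)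
  have hgmem : (stable_agent_name sid,
      ordered.filter (fun t => stable_agent_name t == stable_agent_name sid)) ∈ (pvGroups ordered).items := by
    rw [hitems]
    exact List.mem_map_of_mem hbmem
  have hsg : sid ∈ ordered.filter (fun t => stable_agent_name t == stable_agent_name sid) :=
    List.mem_filter.mpr ⟨hmem, by simp⟩
  have hother : ∀ p ∈ (pvGroups ordered).items, p.1 ≠ stable_agent_name sid → sid ∉ p.2 := by
    rw [hitems]
    intro p hp hpb hsp
    rcases List.mem_map.mp hp with ⟨k, _, hk⟩
    subst hk
    have h1 := (List.mem_filter.mp hsp).2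
    have h2 : stable_agent_name sid = k := by simpa using h1
    exact hpb h2.symm
  have h := pv_outer_val (pvGroups ordered).items PySem.Dict.empty sid (stable_agent_name sid)
    (ordered.filter (fun t => stable_agent_name t == stable_agent_name sid))
    hfst hgmem hsg (hsorted.filter _) hother
  have hc : List.countP (fun a => decide (a ≤ sid) && (stable_agent_name a == stable_agent_name sid)) ordered
      = List.countP (fun t => (stable_agent_name t == stable_agent_name sid) && decide (t ≤ sid)) ordered :=
    List.countP_congr (fun t _ => by rw [Bool.and_comm])
  rw [pvNameDict, h, List.countP_filter, hc]

-- ===== VERDICT (by name: the statement is the Claim_ definition above) =====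
theorem assign_agent_names_spec : Claim_equal_assign_agent_names := by
  intro session_ids _
  unfold Spec_assign_agent_names
  show (((PySem.List.sorted session_ids (fun x => x) false).foldl pvStepA
      (PySem.Dict.empty, PySem.Dict.empty)).2.items) =
    (((PySem.List.dedup (PySem.List.sorted session_ids (fun x => x) false)).foldl
      (fun d sid => d.insert sid
        (PySem.Dict.getD (pvNameDict (PySem.List.sorted session_ids (fun x => x) false)) sid ""))
      PySem.Dict.empty).items)
  set ordered := PySem.List.sorted session_ids (fun x => x) false with hord
  have hsorted : ordered.Pairwise (· ≤ ·) := PySem.List.sorted_pairwise session_ids (fun x => x)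
  set dA := (ordered.foldl pvStepA (PySem.Dict.empty, PySem.Dict.empty)).2 with hdA
  have hkeys : dA.keys = PySem.List.dedup ordered := by
    rw [hdA, pv_keys_foldA]
    simp [PySem.Dict.keys_empty, PySem.Set.update_nil_left]
  have hnd : dA.keys.Nodup := by
    rw [hkeys]
    simp [PySem.Set.nodup_ofList ordered]
  have hA : dA.items = dA.keys.map (fun k => (k, dA.getD k "")) :=
    PySem.Dict.items_eq_map_keys dA hnd ""
  have hfresh : ∀ s ∈ PySem.List.dedup ordered,
      (PySem.Dict.empty : PySem.Dict String String).contains s = false := by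
    intro s _; simp
  have hndd : ((PySem.List.dedup ordered).map (fun s => s)).Nodup := by
    simp [PySem.Set.nodup_ofList ordered]
  have hB : ((PySem.List.dedup ordered).foldl
        (fun d sid => d.insert sid (PySem.Dict.getD (pvNameDict ordered) sid ""))
        PySem.Dict.empty).items
      = (PySem.List.dedup ordered).map (fun sid => (sid, PySem.Dict.getD (pvNameDict ordered) sid "")) := by
    have h := PySem.Dict.items_foldl_insert_fresh (PySem.List.dedup ordered)
      (fun s => s) (fun sid => PySem.Dict.getD (pvNameDict ordered) sid "") PySem.Dict.empty hfresh hndd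
    simpa using h
  rw [hA, hkeys, hB]
  refine List.map_congr_left ?_
  intro sid hmem
  have hmem' : sid ∈ ordered := by
    have h := PySem.Set.mem_ofList (xs := ordered) (y := sid)
    rw [PySem.List.dedup_eq_ofList] at hmem
    exact h.mp hmem
  have hv := pv_get?_foldA ordered PySem.Dict.empty PySem.Dict.empty hsorted sid hmem'
  have hn := pv_nameDict_val ordered sid hsorted hmem'
  have hval : dA.getD sid "" = PySem.Dict.getD (pvNameDict ordered) sid "" := by
    rw [PySem.Dict.getD_eq_get?_getD, PySem.Dict.getD_eq_get?_getD, hdA, hv, hn]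
    simp
  rw [hval]
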